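-- pv_equiv track=rewrite | github.com/vizhai-ai-dev/eye-movement-tracking | gaze_tracker/gaze_estimator.py | _get_eye_box
-- ===== SOURCE A (Python) =====
-- def _get_eye_box(eye_landmarks):
--     """Get the bounding box of the eye"""
--     if not eye_landmarks:
--         return None
--
--     x_coords = [p[0] for p in eye_landmarks]
--     y_coords = [p[1] for p in eye_landmarks]
--
--     min_x, max_x = min(x_coords), max(x_coords)
--     min_y, max_y = min(y_coords), max(y_coords)
--
--     eye_width = max_x - min_x
--     eye_height = max_y - min_y
--
--     return (min_x, min_y, eye_width, eye_height)
-- ===== SOURCE B (Python) =====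
-- def _get_eye_box(eye_landmarks):
--     """Get the bounding box of the eye"""
--     if not eye_landmarks:
--         return None
--     min_x, min_y = eye_landmarks[0]
--     max_x, max_y = min_x, min_y
--     for x, y in eye_landmarks[1:]:
--         if x < min_x:
--             min_x = x
--         if x > max_x:
--             max_x = x
--         if y < min_y:
--             min_y = y
--         if y > max_y:
--             max_y = y
--     return (min_x, min_y, max_x - min_x, max_y - min_y)
-- ===== Notes on version B (the rewrite author's own statement) =====
-- stated objective: alternative
-- what changed: Replaces the two coordinate-list comprehensions plus four separate min/max reductions with a single fused pass that maintains all four running extrema in one loop.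
import Mathlib
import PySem

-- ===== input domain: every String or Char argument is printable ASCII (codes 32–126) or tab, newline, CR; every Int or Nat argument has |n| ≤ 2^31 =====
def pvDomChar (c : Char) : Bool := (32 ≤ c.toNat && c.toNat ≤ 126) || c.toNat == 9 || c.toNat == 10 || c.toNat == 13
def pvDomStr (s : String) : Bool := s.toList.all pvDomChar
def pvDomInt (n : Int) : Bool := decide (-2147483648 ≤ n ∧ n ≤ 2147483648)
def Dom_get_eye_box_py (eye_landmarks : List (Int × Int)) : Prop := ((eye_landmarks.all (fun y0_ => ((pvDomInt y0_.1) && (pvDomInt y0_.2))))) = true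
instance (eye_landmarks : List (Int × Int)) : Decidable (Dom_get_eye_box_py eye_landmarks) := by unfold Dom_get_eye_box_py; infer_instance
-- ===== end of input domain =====

-- B replaces A's two coordinate comprehensions + four min/max reductions by one fused
-- single-pass loop maintaining all four running extrema (alternative decomposition).

-- ===== PORT A =====
def get_eye_box_py (eye_landmarks : List (Int × Int)) : Option (Int × Int × Int × Int) :=
  if eye_landmarks = [] then none
  else
    let x_coords := eye_landmarks.map (fun p => p.1)
    let y_coords := eye_landmarks.map (fun p => p.2)
    match PySem.List.min? x_coords (fun v => v), PySem.List.max? x_coords (fun v => v),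
          PySem.List.min? y_coords (fun v => v), PySem.List.max? y_coords (fun v => v) with
    | some min_x, some max_x, some min_y, some max_y =>
        some (min_x, min_y, max_x - min_x, max_y - min_y)
    | _, _, _, _ => none

-- ===== PORT B =====
def pvStepB (s : Int × Int × Int × Int) (p : Int × Int) : Int × Int × Int × Int :=
  let mnx := if p.1 < s.1 then p.1 else s.1
  let mxx := if p.1 > s.2.1 then p.1 else s.2.1
  let mny := if p.2 < s.2.2.1 then p.2 else s.2.2.1
  let mxy := if p.2 > s.2.2.2 then p.2 else s.2.2.2
  (mnx, mxx, mny, mxy)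

def get_eye_box_py_alt (eye_landmarks : List (Int × Int)) : Option (Int × Int × Int × Int) :=
  match eye_landmarks with
  | [] => none
  | (x0, y0) :: rest =>
    let s := rest.foldl pvStepB (x0, x0, y0, y0)
    some (s.1, s.2.2.1, s.2.1 - s.1, s.2.2.2 - s.2.2.1)

-- ===== PRECONDITION & SPEC =====
def Spec_get_eye_box_py (eye_landmarks : List (Int × Int)) (out : Option (Int × Int × Int × Int)) : Prop := out = get_eye_box_py_alt eye_landmarks
instance (eye_landmarks : List (Int × Int)) (out : Option (Int × Int × Int × Int)) : Decidable (Spec_get_eye_box_py eye_landmarks out) := by unfold Spec_get_eye_box_py; infer_instance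

-- ===== CLAIM (what is proved, stated in full; the proofs are below) =====
def Claim_equal_get_eye_box_py : Prop := ∀ (eye_landmarks : List (Int × Int)), Dom_get_eye_box_py eye_landmarks → Spec_get_eye_box_py eye_landmarks (get_eye_box_py eye_landmarks)

-- ===== LEMMAS AND PROOFS =====

theorem pvFoldB_eq (rest : List (Int × Int)) (a b c d : Int) :
    rest.foldl pvStepB (a, b, c, d) =
      ((rest.map (fun p => p.1)).foldl min a,
       (rest.map (fun p => p.1)).foldl max b,
       (rest.map (fun p => p.2)).foldl min c,
       (rest.map (fun p => p.2)).foldl max d) := by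
  induction rest generalizing a b c d with
  | nil => rfl
  | cons p t ih =>
    simp only [List.foldl_cons, List.map_cons, ih, pvStepB]
    congr 1
    · congr 1; rw [min_def]; split_ifs <;> omega
    congr 1
    · congr 1; rw [max_def]; split_ifs <;> omega
    congr 1
    · congr 1; rw [min_def]; split_ifs <;> omega
    · congr 1; rw [max_def]; split_ifs <;> omega

-- ===== VERDICT (by name: the statement is the Claim_ definition above) =====
theorem get_eye_box_py_spec : Claim_equal_get_eye_box_py := by
  intro l _
  unfold Spec_get_eye_box_py get_eye_box_py get_eye_box_py_alt
  match l with
  | [] => rfl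
  | (x0, y0) :: rest =>
    simp only [List.map_cons, PySem.List.min?_id_cons, PySem.List.max?_id_cons,
      reduceCtorEq, if_false, pvFoldB_eq]
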